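-- pv_equiv track=rewrite | github.com/willizdev/compuba | Algoritmos/Introducción a la Programación/Python/Parciales/parcial3.py | subsecuencia_mas_larga
-- ===== SOURCE A (Python) =====
-- def absoluto(n: int) -> int:
--     if n < 0:
--         return -1 * n
--     return n
--
-- def armar_subsecuencia(v: list[int]) -> list[list[int]]:
--     res: list[list[int]] = []
--     sub: list[int] = []
--
--     for numero in v:
--         if len(sub) > 0 and absoluto(sub[len(sub) - 1] - numero) != 1:
--             res.append(sub)
--             sub = []
--         sub.append(numero)
--
--     res.append(sub)
--     return res
--
-- def subsecuencia_mas_larga(v: list[int]) -> tuple[int, int]: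
--     max_longitud: int = 1
--     max_indice: int = 0
--
--     indice: int = 0
--
--     for s in armar_subsecuencia(v):
--         if len(s) > max_longitud:
--             max_longitud = len(s)
--             max_indice = indice
--         indice += len(s)
--
--     return (max_longitud, max_indice)
-- ===== SOURCE B (Python) =====
-- def subsecuencia_mas_larga(v: list[int]) -> tuple[int, int]:
--     best_len, best_idx = 1, 0
--     cur_len, cur_start = 0, 0
--     prev = None
--     for i, x in enumerate(v):
--         if cur_len > 0 and abs(prev - x) != 1:
--             cur_start = i
--             cur_len = 0
--         cur_len += 1
--         prev = x
--         if cur_len > best_len: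
--             best_len = cur_len
--             best_idx = cur_start
--     return (best_len, best_idx)
-- ===== Notes on version B (the rewrite author's own statement) =====
-- stated objective: faster
-- what changed: Replaced the helper that materializes a list of run sublists plus a second scanning loop by a single linear pass that tracks the current run's length/start and the best so far, removing all intermediate list allocation.
import Mathlib
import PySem

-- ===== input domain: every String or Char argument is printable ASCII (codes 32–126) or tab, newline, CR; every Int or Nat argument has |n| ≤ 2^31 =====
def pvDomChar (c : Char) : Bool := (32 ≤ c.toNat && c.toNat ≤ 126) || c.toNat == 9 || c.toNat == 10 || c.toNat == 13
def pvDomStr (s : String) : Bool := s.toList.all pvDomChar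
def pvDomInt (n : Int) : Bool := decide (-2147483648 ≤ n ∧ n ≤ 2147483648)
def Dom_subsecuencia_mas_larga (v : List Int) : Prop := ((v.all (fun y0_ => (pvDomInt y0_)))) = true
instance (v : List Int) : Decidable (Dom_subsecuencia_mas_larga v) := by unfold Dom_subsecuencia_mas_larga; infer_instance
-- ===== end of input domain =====

-- B replaces A's helper that materializes the list of run sublists (plus a second loop over it)
-- by a single pass with O(1) state (current run length/start, best so far); return values are equal.

-- ===== PORT A =====
def absoluto (n : Int) : Int := if n < 0 then -1 * n else n

-- one iteration of the for-loop in armar_subsecuencia, state = (res, sub)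
def stepA (st : List (List Int) × List Int) (numero : Int) : List (List Int) × List Int :=
  if 0 < st.2.length ∧ absoluto (st.2.getLast?.getD 0 - numero) ≠ 1 then
    (st.1 ++ [st.2], [numero])     -- res.append(sub); sub = []; sub.append(numero)
  else
    (st.1, st.2 ++ [numero])       -- sub.append(numero)

def armar_subsecuencia (v : List Int) : List (List Int) :=
  let p := v.foldl stepA ([], [])
  p.1 ++ [p.2]

-- one iteration of the for-loop in subsecuencia_mas_larga, state = (max_longitud, max_indice, indice)
def stepF (st : Int × Int × Int) (s : List Int) : Int × Int × Int :=
  if (s.length : Int) > st.1 then ((s.length : Int), st.2.2, st.2.2 + (s.length : Int))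
  else (st.1, st.2.1, st.2.2 + (s.length : Int))

def subsecuencia_mas_larga (v : List Int) : Int × Int :=
  let r := (armar_subsecuencia v).foldl stepF (1, 0, 0)
  (r.1, r.2.1)

-- ===== PORT B =====
def pyAbs (n : Int) : Int := if n < 0 then -n else n   -- Python's abs on int

-- one iteration of B's loop, state = (best_len, best_idx, cur_len, cur_start, prev)
def stepB (st : Int × Int × Int × Int × Option Int) (xi : Int × Nat) : Int × Int × Int × Int × Option Int :=
  let x := xi.1
  let i := xi.2
  let (bl, bi, cl, cs, prev) := st
  let (cs, cl) := if 0 < cl ∧ pyAbs (prev.getD 0 - x) ≠ 1 then ((i : Int), (0 : Int)) else (cs, cl)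
  let cl := cl + 1
  let prev := some x
  let (bl, bi) := if cl > bl then (cl, cs) else (bl, bi)
  (bl, bi, cl, cs, prev)

def subsecuencia_mas_larga_alt (v : List Int) : Int × Int :=
  let st := (v.zipIdx).foldl stepB (1, 0, 0, 0, none)   -- for i, x in enumerate(v)
  (st.1, st.2.1)

-- ===== PRECONDITION & SPEC =====
def Spec_subsecuencia_mas_larga (v : List Int) (out : Int × Int) : Prop := out = subsecuencia_mas_larga_alt v
instance (v : List Int) (out : Int × Int) : Decidable (Spec_subsecuencia_mas_larga v out) := by unfold Spec_subsecuencia_mas_larga; infer_instance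

-- ===== CLAIM (what is proved, stated in full; the proofs are below) =====
def Claim_equal_subsecuencia_mas_larga : Prop := ∀ (v : List Int), Dom_subsecuencia_mas_larga v → Spec_subsecuencia_mas_larga v (subsecuencia_mas_larga v)

-- ===== LEMMAS AND PROOFS =====

-- total length of the groups accumulated so far
def lenN (gs : List (List Int)) : Nat := (gs.map List.length).sum

theorem lenN_append (gs : List (List Int)) (g : List Int) : lenN (gs ++ [g]) = lenN gs + g.length := by
  simp [lenN]

theorem absoluto_eq_pyAbs (n : Int) : absoluto n = pyAbs n := by
  simp [absoluto, pyAbs]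

-- the running index component of A's second fold is the total length consumed
theorem foldF_idx (gs : List (List Int)) : ∀ (init : Int × Int × Int),
    (List.foldl stepF init gs).2.2 = init.2.2 + (lenN gs : Int) := by
  induction gs with
  | nil => intro init; simp [lenN]
  | cons g gs ih =>
    intro init
    simp only [List.foldl_cons, ih, stepF, lenN, List.map_cons, List.sum_cons]
    split_ifs <;> push_cast <;> ring

-- max_longitud never decreases
theorem foldF_mono (gs : List (List Int)) : ∀ (init : Int × Int × Int),
    init.1 ≤ (List.foldl stepF init gs).1 := by
  induction gs with
  | nil => intro init; simp
  | cons g gs ih =>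
    intro init
    refine le_trans ?_ (ih (stepF init g))
    simp only [stepF]; split_ifs with h
    · simp; omega
    · simp

theorem foldF_one_le (gs : List (List Int)) : 1 ≤ (List.foldl stepF (1, 0, 0) gs).1 :=
  foldF_mono gs (1, 0, 0)

-- one B-step when a new run starts, expressed against A's finishing fold
theorem stepB_new (res : List (List Int)) (sub : List Int) (x : Int) (hlen : 0 < sub.length)
    (hc : pyAbs (sub.getLast?.getD 0 - x) ≠ 1) :
    stepB
      ((List.foldl stepF (1,0,0) (res ++ [sub])).1,
       (List.foldl stepF (1,0,0) (res ++ [sub])).2.1,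
       (sub.length : Int), ((lenN res : Nat) : Int), some (sub.getLast?.getD 0))
      (x, lenN res + sub.length)
      = ((List.foldl stepF (1,0,0) ((res ++ [sub]) ++ [[x]])).1,
         (List.foldl stepF (1,0,0) ((res ++ [sub]) ++ [[x]])).2.1,
         (1 : Int), ((lenN (res ++ [sub]) : Nat) : Int), some x) := by
  have h1 := foldF_one_le (res ++ [sub])
  have hne : ¬ (((0:Int) + 1) > (List.foldl stepF (1,0,0) (res ++ [sub])).1) := by omega
  have hkeep : List.foldl stepF (1,0,0) ((res ++ [sub]) ++ [[x]])
      = ((List.foldl stepF (1,0,0) (res ++ [sub])).1,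
         (List.foldl stepF (1,0,0) (res ++ [sub])).2.1,
         (List.foldl stepF (1,0,0) (res ++ [sub])).2.2 + 1) := by
    rw [List.foldl_append]
    simp only [List.foldl_cons, List.foldl_nil, stepF, List.length_singleton, Nat.cast_one]
    rw [if_neg (by omega)]
  have hcond : (0 < ((sub.length : Nat) : Int) ∧ pyAbs (sub.getLast?.getD 0 - x) ≠ 1) :=
    ⟨by exact_mod_cast hlen, hc⟩
  rw [hkeep]
  simp only [stepB, Option.getD_some, if_pos hcond]
  rw [if_neg hne]
  simp [lenN_append]

-- one B-step when the current run continues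
theorem stepB_cont (res : List (List Int)) (sub : List Int) (x : Int)
    (hc : pyAbs (sub.getLast?.getD 0 - x) = 1) :
    stepB
      ((List.foldl stepF (1,0,0) (res ++ [sub])).1,
       (List.foldl stepF (1,0,0) (res ++ [sub])).2.1,
       (sub.length : Int), ((lenN res : Nat) : Int), some (sub.getLast?.getD 0))
      (x, lenN res + sub.length)
      = ((List.foldl stepF (1,0,0) (res ++ [sub ++ [x]])).1,
         (List.foldl stepF (1,0,0) (res ++ [sub ++ [x]])).2.1,
         ((sub ++ [x]).length : Int), ((lenN res : Nat) : Int), some x) := by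
  have hFs : List.foldl stepF (1,0,0) (res ++ [sub]) = stepF (List.foldl stepF (1,0,0) res) sub := by
    rw [List.foldl_append]; rfl
  have hFx : List.foldl stepF (1,0,0) (res ++ [sub ++ [x]])
      = stepF (List.foldl stepF (1,0,0) res) (sub ++ [x]) := by
    rw [List.foldl_append]; rfl
  have hidx : (List.foldl stepF (1,0,0) res).2.2 = ((lenN res : Nat) : Int) := by
    simpa using foldF_idx res (1,0,0)
  have hcond : ¬ (0 < ((sub.length : Nat) : Int) ∧ pyAbs (sub.getLast?.getD 0 - x) ≠ 1) := by
    simp [hc]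
  rw [hFs, hFx]
  simp only [stepB, Option.getD_some, if_neg hcond, stepF, hidx, List.length_append,
    List.length_singleton]
  split_ifs <;> simp_all [Prod.ext_iff] <;> push_cast at * <;> omega

-- Main invariant: starting B's loop in the state corresponding to A's partial
-- state (res, sub) yields the same (best_len, best_idx) as finishing A.
theorem inv_lemma (rest : List Int) : ∀ (res : List (List Int)) (sub : List Int), sub ≠ [] →
    (let F := List.foldl stepF (1, 0, 0) (res ++ [sub])
     let st := List.foldl stepB
        (F.1, F.2.1, (sub.length : Int), ((lenN res : Nat) : Int), some (sub.getLast?.getD 0))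
        (rest.zipIdx (lenN res + sub.length))
     ((st.1, st.2.1) : Int × Int))
    = (let q := List.foldl stepA (res, sub) rest
       let G := List.foldl stepF (1, 0, 0) (q.1 ++ [q.2])
       ((G.1, G.2.1) : Int × Int)) := by
  induction rest with
  | nil => intro res sub hsub; simp
  | cons x rest ih =>
    intro res sub hsub
    have hlen : 0 < sub.length := List.length_pos_of_ne_nil hsub
    simp only [List.zipIdx_cons, List.foldl_cons]
    by_cases hc : pyAbs (sub.getLast?.getD 0 - x) ≠ 1
    · -- new run starts
      have hA : stepA (res, sub) x = (res ++ [sub], [x]) := by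
        simp [stepA, absoluto_eq_pyAbs, hlen, hc]
      have hoff : lenN res + sub.length + 1 = lenN (res ++ [sub]) + ([x] : List Int).length := by
        simp [lenN_append]
      rw [hA, stepB_new res sub x hlen hc, hoff]
      have := ih (res ++ [sub]) [x] (by simp)
      simpa using this
    · -- run continues
      rw [Ne, not_not] at hc
      have hA : stepA (res, sub) x = (res, sub ++ [x]) := by
        simp [stepA, absoluto_eq_pyAbs, hc]
      have hoff : lenN res + sub.length + 1 = lenN res + (sub ++ [x]).length := by simp; omega
      rw [hA, stepB_cont res sub x hc, hoff]
      have := ih res (sub ++ [x]) (by simp)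
      simpa using this

-- ===== VERDICT (by name: the statement is the Claim_ definition above) =====
theorem subsecuencia_mas_larga_spec : Claim_equal_subsecuencia_mas_larga := by
  intro v _
  show subsecuencia_mas_larga v = subsecuencia_mas_larga_alt v
  cases v with
  | nil => decide
  | cons x rest =>
    unfold subsecuencia_mas_larga subsecuencia_mas_larga_alt armar_subsecuencia
    simp only [List.zipIdx_cons, List.foldl_cons]
    have hA0 : stepA ([], []) x = ([], [x]) := by simp [stepA]
    have hB0 : stepB (1, 0, 0, 0, none) (x, 0) = (1, 0, 1, 0, some x) := by
      simp [stepB]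
    rw [hA0, hB0]
    have := inv_lemma rest [] [x] (by simp)
    simp only [lenN, List.map_nil, List.sum_nil, List.nil_append, Nat.cast_zero,
      List.length_singleton, Nat.cast_one, List.getLast?_singleton, Option.getD_some] at this
    have h1 : List.foldl stepF (1, 0, 0) [([x] : List Int)] = ((1 : Int), (0 : Int), (1 : Int)) := by
      norm_num [stepF]
    rw [h1] at this
    simpa using this.symm
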